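-- pv_equiv track=rewrite | github.com/Anna-Edel/Regular-expressions | phonebook.py | final_format
-- ===== SOURCE A (Python) =====
-- from pprint import pprint
--
-- def final_format(result_list):
--     """Сравнение дубликатов в списке контактов, затем вывод результата и возвращение итогового списка."""
--     final_list = list()
--     for c in result_list:
--         for contact_in_final_list in final_list:
--             if contact_in_final_list[:1] == c[:1]:
--                 final_list.remove(contact_in_final_list)
--                 c = [x if x != "" else y for x, y in zip(contact_in_final_list, c)]
--         final_list.append(c)
--
--     pprint(final_list)
--     return final_list
-- ===== SOURCE B (Python) =====
-- # Staged re-implementation: pass 1 groups contacts by first field, pass 2 computes the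
-- # output order (order of each key's LAST occurrence) by a reverse-scan dedup, pass 3
-- # reduces each group left-to-right filling empty cells.
-- # (A additionally pprints the result — a console side effect not reproduced here.)
-- def final_format(result_list):
--     """Сравнение дубликатов в списке контактов, затем вывод результата и возвращение итогового списка."""
--     groups = {}
--     for c in result_list:
--         k = tuple(c[:1])
--         groups.setdefault(k, []).append(c)
--     seen = set()
--     rev_order = []
--     for c in reversed(result_list):
--         k = tuple(c[:1])
--         if k not in seen:
--             seen.add(k)
--             rev_order.append(k)
--     final_list = []
--     for k in reversed(rev_order):
--         group = groups[k]          # k came from result_list, so group is nonempty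
--         merged = group[0]
--         for c in group[1:]:
--             merged = [x or y for x, y in zip(merged, c)]
--         final_list.append(merged)
--     return final_list
-- ===== Notes on version B (the rewrite author's own statement) =====
-- stated objective: faster
-- what changed: Replaces A's merge-while-scanning of the accumulated result (inner rescan-and-remove per contact) by three staged passes: build a dict of per-key contact groups, derive the output key order (last occurrence) by a reverse-scan dedup with a set, then reduce each group left-to-right once.
import Mathlib
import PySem

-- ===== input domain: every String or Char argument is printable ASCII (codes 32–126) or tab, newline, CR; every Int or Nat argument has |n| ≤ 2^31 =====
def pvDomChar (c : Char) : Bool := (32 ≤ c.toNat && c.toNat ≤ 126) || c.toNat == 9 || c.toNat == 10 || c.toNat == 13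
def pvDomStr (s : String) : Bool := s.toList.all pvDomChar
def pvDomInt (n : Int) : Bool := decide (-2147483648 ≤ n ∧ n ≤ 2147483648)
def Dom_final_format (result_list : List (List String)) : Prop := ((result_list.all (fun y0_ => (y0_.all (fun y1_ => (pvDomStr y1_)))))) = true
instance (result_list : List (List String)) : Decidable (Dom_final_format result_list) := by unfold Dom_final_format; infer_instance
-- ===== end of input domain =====

-- B replaces A's merge-while-scanning of the accumulated result by three staged passes: group the
-- contacts by first field, derive the output order (last occurrence per key) by a reverse-scan
-- dedup, then reduce each group once.  A additionally pprints the result, a console side effect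
-- neither B nor this model reproduces — the equivalence proved is about the return value.

-- ===== PORT A =====
-- A's merge comprehension [x if x != "" else y for x, y in zip(a, c)]
def pvMerge (a c : List String) : List String :=
  (a.zip c).map (fun p => if p.1 ≠ "" then p.1 else p.2)

-- Python's `for contact_in_final_list in final_list` with an in-loop `remove`: index-based
-- traversal whose internal index advances every step while `remove` deletes the first equal element
-- (List.erase); `c` is rebound to the merged contact when the first fields (c[:1]) coincide.
def pvInnerA (i : Nat) (lst : List (List String)) (cc : List String) :
    List (List String) × List String :=
  if h : i < lst.length then
    if (lst[i]).take 1 = cc.take 1 then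
      pvInnerA (i + 1) (lst.erase lst[i]) (pvMerge lst[i] cc)
    else
      pvInnerA (i + 1) lst cc
  else (lst, cc)
termination_by lst.length - i
decreasing_by
  · have : (lst.erase lst[i]).length = lst.length - 1 :=
      List.length_erase_of_mem (List.getElem_mem h)
    omega
  · omega

def pvStepA (fl : List (List String)) (c : List String) : List (List String) :=
  let r := pvInnerA 0 fl c
  r.1 ++ [r.2]

def final_format (result_list : List (List String)) : List (List String) :=
  result_list.foldl pvStepA []

-- ===== PORT B =====
-- pass 1: groups.setdefault(tuple(c[:1]), []).append(c)  —  groups[k] = groups.get(k, []) + [c]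
def pvGroupsStep (d : PySem.Dict (List String) (List (List String))) (c : List String) :
    PySem.Dict (List String) (List (List String)) :=
  d.modify (c.take 1) [] (fun g => g ++ [c])

-- pass 2 body: if k not in seen: seen.add(k); rev_order.append(k)
def pvOrderStep (st : PySem.Set (List String) × List (List String)) (c : List String) :
    PySem.Set (List String) × List (List String) :=
  let k := c.take 1
  if PySem.Set.contains st.1 k then st else (PySem.Set.add st.1 k, st.2 ++ [k])

-- B's merge comprehension [x or y for x, y in zip(merged, c)]
def pvMergeOr (a c : List String) : List String :=
  (a.zip c).map (fun p => if p.1 = "" then p.2 else p.1)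

-- pass 3 body: merged = group[0]; for c in group[1:]: merged = [x or y …]
-- (every key in rev_order comes from result_list, so its group is nonempty; [] is unreachable)
def pvReduceGroup (g : List (List String)) : List String :=
  match g with
  | [] => []
  | h :: t => t.foldl pvMergeOr h

def final_format_alt (result_list : List (List String)) : List (List String) :=
  let groups := result_list.foldl pvGroupsStep PySem.Dict.empty
  let revOrder := (result_list.reverse.foldl pvOrderStep (PySem.Set.empty, [])).2
  revOrder.reverse.foldl (fun fl k => fl ++ [pvReduceGroup (groups.getD k [])]) []

-- ===== PRECONDITION & SPEC =====
def Spec_final_format (result_list : List (List String)) (out : List (List String)) : Prop := out = final_format_alt result_list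
instance (result_list : List (List String)) (out : List (List String)) : Decidable (Spec_final_format result_list out) := by unfold Spec_final_format; infer_instance

-- ===== CLAIM (what is proved, stated in full; the proofs are below) =====
def Claim_equal_final_format : Prop := ∀ (result_list : List (List String)), Dom_final_format result_list → Spec_final_format result_list (final_format result_list)

-- ===== LEMMAS AND PROOFS =====

-- proof-only intermediate: the one-pass dict with pop-then-reinsert; A's fold equals its values
def pvStepB (d : PySem.Dict (List String) (List String)) (c : List String) :
    PySem.Dict (List String) (List String) :=
  let k := c.take 1
  match d.get? k with
  | some prev => (d.erase k).insert k (pvMerge prev c)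
  | none => d.insert k c

-- the dict invariant: keys are unique and each stored contact starts with its key
def pvInv (d : PySem.Dict (List String) (List String)) : Prop :=
  d.keys.Nodup ∧ ∀ p ∈ d.items, p.2.take 1 = p.1

lemma pvMerge_take_one (a c : List String) (h : a.take 1 = c.take 1) :
    (pvMerge a c).take 1 = c.take 1 := by
  cases a with
  | nil => cases c with
    | nil => simp [pvMerge]
    | cons y ys => simp at h
  | cons x xs => cases c with
    | nil => simp at h
    | cons y ys =>
        simp [List.take] at h
        subst h
        simp [pvMerge, List.take]

lemma pvInnerA_erase_done (n i : Nat)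
    (ih : ∀ (lst : List (List String)) (i : Nat) (cc : List String),
      lst.length ≤ i + n →
      (lst.map (fun v => v.take 1)).Nodup →
      pvInnerA i lst cc =
        match (lst.drop i).find? (fun v => v.take 1 == cc.take 1) with
        | some v => (lst.erase v, pvMerge v cc)
        | none => (lst, cc))
    (l1 l2 : List (List String)) (a cc : List String)
    (hlen1 : l1.length = i) (hm : a.take 1 = cc.take 1)
    (hnd : ((l1 ++ a :: l2).map (fun v => v.take 1)).Nodup)
    (hle : l1.length + l2.length ≤ i + n) :
    pvInnerA (i + 1) ((l1 ++ a :: l2).erase a) (pvMerge a cc) =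
      ((l1 ++ a :: l2).erase a, pvMerge a cc) := by
  simp only [List.map_append, List.map_cons, List.nodup_append, List.nodup_cons] at hnd
  obtain ⟨h1, ⟨h2a, h2b⟩, h3⟩ := hnd
  have hna : a ∉ l1 := fun hmem =>
    h3 _ (List.mem_map_of_mem hmem) _ (List.mem_cons_self) rfl
  have herase : (l1 ++ a :: l2).erase a = l1 ++ l2 := by
    rw [List.erase_append_right _ hna, List.erase_cons_head]
  rw [herase]
  have hnd' : ((l1 ++ l2).map (fun v => v.take 1)).Nodup := by
    simp only [List.map_append, List.nodup_append]
    exact ⟨h1, h2b, fun x hx y hy => h3 x hx y (List.mem_cons_of_mem _ hy)⟩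
  rw [ih (l1 ++ l2) (i + 1) (pvMerge a cc) (by simp; omega) hnd']
  have hfn : ((l1 ++ l2).drop (i + 1)).find?
      (fun v => v.take 1 == (pvMerge a cc).take 1) = none := by
    apply List.find?_eq_none.mpr
    intro v hv
    have hv' : v ∈ l2 := by
      have hd : (l1 ++ l2).drop (i + 1) = l2.drop 1 := by
        rw [List.drop_append]
        simp [hlen1]
      exact List.mem_of_mem_drop (hd ▸ hv)
    simp only [beq_iff_eq, pvMerge_take_one _ _ hm, ← hm]
    intro heq
    exact h2a (heq ▸ List.mem_map_of_mem hv')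
  rw [hfn]

-- the inner loop on a list of contacts with pairwise distinct first fields removes the unique
-- match (if any) and returns the merged contact
lemma pvInnerA_spec (n : Nat) : ∀ (lst : List (List String)) (i : Nat) (cc : List String),
    lst.length ≤ i + n →
    (lst.map (fun v => v.take 1)).Nodup →
    pvInnerA i lst cc =
      match (lst.drop i).find? (fun v => v.take 1 == cc.take 1) with
      | some v => (lst.erase v, pvMerge v cc)
      | none => (lst, cc) := by
  induction n with
  | zero =>
      intro lst i cc hle hnd
      have hge : ¬ i < lst.length := by omega
      have hdrop : lst.drop i = [] := List.drop_eq_nil_of_le (by omega)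
      rw [pvInnerA]
      simp [dif_neg hge, hdrop]
  | succ n ih =>
      intro lst i cc hle hnd
      rw [pvInnerA]
      by_cases h : i < lst.length
      · simp only [dif_pos h]
        obtain ⟨a, ha⟩ : ∃ a, lst[i] = a := ⟨_, rfl⟩
        rw [ha]
        have hdrop : lst.drop i = a :: lst.drop (i + 1) := ha ▸ List.drop_eq_getElem_cons h
        by_cases hm : a.take 1 = cc.take 1
        · simp only [if_pos hm]
          have hfind : (lst.drop i).find? (fun v => v.take 1 == cc.take 1) = some a := by
            rw [hdrop]; exact List.find?_cons_of_pos (by simp [hm])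
          simp only [hfind]
          have hsplit : lst = lst.take i ++ a :: lst.drop (i + 1) := by
            conv_lhs => rw [← List.take_append_drop i lst, hdrop]
          rw [hsplit]
          exact pvInnerA_erase_done n i ih _ _ a cc (by rw [List.length_take]; omega) hm
            (hsplit ▸ hnd) (by simp [List.length_take, List.length_drop]; omega)
        · simp only [if_neg hm]
          rw [ih lst (i + 1) cc (by omega) hnd]
          have hstep : (lst.drop i).find? (fun v => v.take 1 == cc.take 1) =
              (lst.drop (i + 1)).find? (fun v => v.take 1 == cc.take 1) := by
            rw [hdrop, List.find?_cons_of_neg (by simp [hm])]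
          rw [hstep]
      · simp only [dif_neg h]
        have hdrop : lst.drop i = [] := List.drop_eq_nil_of_le (by omega)
        simp [hdrop]

lemma pvDict_some_decomp (d : PySem.Dict (List String) (List String))
    (k prev : List String) (hnd : d.keys.Nodup) (hk : d.get? k = some prev) :
    ∃ t1 t2, d.items = t1 ++ (k, prev) :: t2 ∧ (∀ q ∈ t1, q.1 ≠ k) ∧ ∀ q ∈ t2, q.1 ≠ k := by
  simp only [PySem.Dict.get?, Option.map_eq_some_iff] at hk
  obtain ⟨p0, hf, hp2⟩ := hk
  obtain ⟨hpred, t1, t2, hitems, ht1⟩ := List.find?_eq_some_iff_append.mp hf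
  have hp1 : p0.1 = k := by simpa using hpred
  have hp0 : p0 = (k, prev) := by cases p0; simp_all
  subst hp0
  refine ⟨t1, t2, by simpa using hitems, fun q hq => by simpa using ht1 q hq, ?_⟩
  intro q hq heq
  have : d.keys = t1.map (fun p : List String × List String => p.1) ++ k :: t2.map (fun p : List String × List String => p.1) := by
    simp [PySem.Dict.keys, hitems]
  rw [this] at hnd
  have := (List.nodup_append.mp hnd).2.1
  exact (List.nodup_cons.mp this).1 (heq ▸ List.mem_map_of_mem hq)

lemma pvStepB_items_some (d : PySem.Dict (List String) (List String))
    (c prev : List String) (t1 t2 : List (List String × List String))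
    (hk : d.get? (c.take 1) = some prev)
    (hitems : d.items = t1 ++ (c.take 1, prev) :: t2)
    (h1 : ∀ q ∈ t1, q.1 ≠ c.take 1) (h2 : ∀ q ∈ t2, q.1 ≠ c.take 1) :
    (pvStepB d c).items = (t1 ++ t2) ++ [(c.take 1, pvMerge prev c)] := by
  simp only [pvStepB, hk]
  have herase : (d.erase (c.take 1)).items = t1 ++ t2 := by
    simp only [PySem.Dict.erase, hitems, List.filter_append, List.filter_cons]
    rw [List.filter_eq_self.mpr (fun q hq => by simp [h1 q hq]),
        List.filter_eq_self.mpr (fun q hq => by simp [h2 q hq])]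
    simp
  have hcon : (d.erase (c.take 1)).contains (c.take 1) = false := by
    simp only [PySem.Dict.contains, herase, List.any_eq_false]
    intro q hq
    rcases List.mem_append.mp hq with h | h
    · simp [h1 q h]
    · simp [h2 q h]
  rw [PySem.Dict.items_insert_of_not_contains _ _ hcon, herase]

lemma pvStep_eq (d : PySem.Dict (List String) (List String)) (c : List String)
    (hinv : pvInv d) : pvStepA d.values c = (pvStepB d c).values := by
  obtain ⟨hnd, hval⟩ := hinv
  have hvmap : d.values.map (fun v => v.take 1) = d.keys := by
    simp only [PySem.Dict.values, PySem.Dict.keys, List.map_map]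
    exact List.map_congr_left (fun p hp => hval p hp)
  have hndv : (d.values.map (fun v => v.take 1)).Nodup := hvmap ▸ hnd
  have hA := pvInnerA_spec d.values.length d.values 0 c (by omega) hndv
  rw [List.drop_zero] at hA
  cases hk : d.get? (c.take 1) with
  | some prev =>
      obtain ⟨t1, t2, hitems, h1, h2⟩ := pvDict_some_decomp d _ prev hnd hk
      have hvals : d.values = t1.map (fun p : List String × List String => p.2) ++ prev :: t2.map (fun p : List String × List String => p.2) := by
        simp [PySem.Dict.values, hitems]
      have hmem1 : ∀ v ∈ t1.map (fun p : List String × List String => p.2), v.take 1 ≠ c.take 1 := by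
        intro v hv
        obtain ⟨q, hq, rfl⟩ := List.mem_map.mp hv
        rw [hval q (hitems ▸ List.mem_append_left _ hq)]
        exact h1 q hq
      have hprev : prev.take 1 = c.take 1 :=
        hval (c.take 1, prev) (hitems ▸ List.mem_append_right _ (List.mem_cons_self))
      have hfind : d.values.find? (fun v => v.take 1 == c.take 1) = some prev := by
        rw [hvals, List.find?_append]
        rw [List.find?_eq_none.mpr (fun v hv => by simp [hmem1 v hv])]
        simp [List.find?_cons_of_pos, hprev]
      have herase : d.values.erase prev = t1.map (fun p : List String × List String => p.2) ++ t2.map (fun p : List String × List String => p.2) := by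
        have hnp : prev ∉ t1.map (fun p : List String × List String => p.2) := fun hmem => hmem1 prev hmem hprev
        rw [hvals, List.erase_append_right _ hnp, List.erase_cons_head]
      rw [pvStepA, hA, hfind]
      show d.values.erase prev ++ [pvMerge prev c] = _
      rw [herase]
      simp [PySem.Dict.values, pvStepB_items_some d c prev t1 t2 hk hitems h1 h2]
  | none =>
      have hnone : ∀ p ∈ d.items, (p.1 == c.take 1) = false := by
        have := hk
        simp only [PySem.Dict.get?, Option.map_eq_none_iff, List.find?_eq_none] at this
        intro p hp; simpa using this p hp
      have hfind : d.values.find? (fun v => v.take 1 == c.take 1) = none := by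
        apply List.find?_eq_none.mpr
        intro v hv
        obtain ⟨q, hq, rfl⟩ := List.mem_map.mp hv
        rw [hval q hq]
        simpa using hnone q hq
      have hcon : d.contains (c.take 1) = false := by
        simp only [PySem.Dict.contains, List.any_eq_false]
        intro q hq; simp [hnone q hq]
      rw [pvStepA, hA, hfind]
      simp [pvStepB, hk, PySem.Dict.values,
        PySem.Dict.items_insert_of_not_contains _ _ hcon]

lemma pvStep_inv (d : PySem.Dict (List String) (List String)) (c : List String)
    (hinv : pvInv d) : pvInv (pvStepB d c) := by
  obtain ⟨hnd, hval⟩ := hinv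
  cases hk : d.get? (c.take 1) with
  | some prev =>
      obtain ⟨t1, t2, hitems, h1, h2⟩ := pvDict_some_decomp d _ prev hnd hk
      have hit := pvStepB_items_some d c prev t1 t2 hk hitems h1 h2
      constructor
      · show ((pvStepB d c).items.map (fun p : List String × List String => p.1)).Nodup
        rw [hit]
        have hkeys : d.keys = t1.map (fun p : List String × List String => p.1) ++ (c.take 1) :: t2.map (fun p : List String × List String => p.1) := by
          simp [PySem.Dict.keys, hitems]
        rw [hkeys] at hnd
        obtain ⟨n1, n2, dis⟩ := List.nodup_append.mp hnd
        obtain ⟨hk2, n2'⟩ := List.nodup_cons.mp n2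
        simp only [List.map_append, List.map_cons, List.map_nil, List.append_assoc]
        refine List.nodup_append.mpr ⟨n1, List.nodup_append.mpr ⟨n2', List.nodup_singleton _, ?_⟩, ?_⟩
        · intro x hx y hy
          simp at hy; subst hy
          intro hxy
          obtain ⟨q, hq, rfl⟩ := List.mem_map.mp hx
          exact h2 q hq hxy
        · intro x hx y hy
          rcases List.mem_append.mp hy with hy | hy
          · exact dis x hx y (List.mem_cons_of_mem _ hy)
          · simp at hy; subst hy
            exact dis x hx (c.take 1) List.mem_cons_self
      · intro p hp
        rw [hit] at hp
        rcases List.mem_append.mp hp with hp | hp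
        · exact hval p (hitems ▸ (by
            rcases List.mem_append.mp hp with h | h
            · exact List.mem_append_left _ h
            · exact List.mem_append_right _ (List.mem_cons_of_mem _ h)))
        · simp at hp; subst hp
          have hprev : prev.take 1 = c.take 1 :=
            hval (c.take 1, prev) (hitems ▸ List.mem_append_right _ List.mem_cons_self)
          exact pvMerge_take_one prev c hprev
  | none =>
      have hcon : d.contains (c.take 1) = false := by
        have := hk
        simp only [PySem.Dict.get?, Option.map_eq_none_iff, List.find?_eq_none] at this
        simp only [PySem.Dict.contains, List.any_eq_false]
        intro q hq; simpa using this q hq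
      have hit : (pvStepB d c).items = d.items ++ [(c.take 1, c)] := by
        simp [pvStepB, hk, PySem.Dict.items_insert_of_not_contains _ _ hcon]
      constructor
      · show ((pvStepB d c).items.map (fun p : List String × List String => p.1)).Nodup
        rw [hit]
        simp only [List.map_append, List.map_cons, List.map_nil]
        apply List.nodup_append.mpr
        refine ⟨hnd, List.nodup_singleton _, ?_⟩
        intro x hx y hy
        simp at hy; subst hy
        intro hxy
        simp only [PySem.Dict.contains, List.any_eq_false] at hcon
        obtain ⟨q, hq, rfl⟩ := List.mem_map.mp hx
        exact absurd hxy (by simpa using hcon q hq)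
      · intro p hp
        rw [hit] at hp
        rcases List.mem_append.mp hp with hp | hp
        · exact hval p hp
        · simp at hp; subst hp; rfl

lemma pvFold_eq (rl : List (List String)) :
    ∀ d, pvInv d → rl.foldl pvStepA d.values = (rl.foldl pvStepB d).values := by
  induction rl with
  | nil => intro d _; rfl
  | cons c rl ih =>
      intro d hinv
      simp only [List.foldl_cons]
      rw [pvStep_eq d c hinv]
      exact ih _ (pvStep_inv d c hinv)

-- ---- characterization of the one-pass dict: keys in keep-last-dedup order, values reduced groups

lemma pvFindMap (ks : List (List String)) (v : List String → List String) (k : List String) :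
    ((ks.map (fun k' => (k', v k'))).find? (fun p => p.1 == k)) =
      if k ∈ ks then some (k, v k) else none := by
  induction ks with
  | nil => simp
  | cons a t ih =>
    by_cases h : a = k
    · subst h
      simp [List.find?_cons_of_pos]
    · rw [List.map_cons, List.find?_cons_of_neg (by simp [h]), ih]
      simp [Ne.symm h]

lemma pvDedupConcat (l : List (List String)) (a : List String) :
    (l ++ [a]).dedup = l.dedup.filter (fun x => x ≠ a) ++ [a] := by
  induction l with
  | nil => simp
  | cons x t ih =>
    rw [List.cons_append]
    by_cases hxt : x ∈ t
    · rw [List.dedup_cons_of_mem (List.mem_append_left _ hxt), ih,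
        List.dedup_cons_of_mem hxt]
    · by_cases hxa : x = a
      · subst hxa
        rw [List.dedup_cons_of_mem (List.mem_append_right _ (List.mem_singleton_self x)), ih,
          List.dedup_cons_of_notMem hxt]
        simp
      · rw [List.dedup_cons_of_notMem (by simp [hxt, hxa]), ih,
          List.dedup_cons_of_notMem hxt]
        simp [hxa]

lemma pvMergeOr_eq (a c : List String) : pvMergeOr a c = pvMerge a c := by
  apply List.map_congr_left
  intro p _
  by_cases h : p.1 = "" <;> simp [h]

lemma pvReduceGroup_concat (g : List (List String)) (c : List String) (h : g ≠ []) :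
    pvReduceGroup (g ++ [c]) = pvMerge (pvReduceGroup g) c := by
  cases g with
  | nil => exact absurd rfl h
  | cons x t => simp [pvReduceGroup, List.foldl_append, pvMergeOr_eq]

def pvChar (rl : List (List String)) : List (List String × List String) :=
  ((rl.map (fun c => c.take 1)).dedup).map
    (fun k => (k, pvReduceGroup (rl.filter (fun c => c.take 1 == k))))

lemma pvMidItems (rl : List (List String)) :
    (rl.foldl pvStepB PySem.Dict.empty).items = pvChar rl := by
  induction rl using List.reverseRecOn with
  | nil => simp [pvChar, PySem.Dict.empty]
  | append_singleton rl c ih =>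
    rw [List.foldl_append, List.foldl_cons, List.foldl_nil]
    have hget : (rl.foldl pvStepB PySem.Dict.empty).get? (c.take 1) =
        if (c.take 1) ∈ (rl.map (fun c => c.take 1)) then
          some (pvReduceGroup (rl.filter (fun c' => c'.take 1 == c.take 1))) else none := by
      simp only [PySem.Dict.get?, ih, pvChar, pvFindMap]
      by_cases h : (c.take 1) ∈ rl.map (fun c => c.take 1)
      · simp [h, List.mem_dedup]
      · simp [h, List.mem_dedup]
    have hmapchar : pvChar (rl ++ [c]) =
        (((rl.map (fun c => c.take 1)).dedup.filter (fun x => x ≠ c.take 1)).map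
          (fun k' => (k', pvReduceGroup (rl.filter (fun c' => c'.take 1 == k')))))
        ++ [(c.take 1, pvReduceGroup (rl.filter (fun c' => c'.take 1 == c.take 1) ++ [c]))] := by
      simp only [pvChar, List.map_append, List.map_cons, List.map_nil, pvDedupConcat]
      congr 1
      · apply List.map_congr_left
        intro x hx
        have hxk : ¬ (c.take 1 = x) := by
          have := List.of_mem_filter hx
          simp only [ne_eq, decide_eq_true_eq] at this
          exact fun h => this h.symm
        simp [List.filter_append, hxk]
      · simp [List.filter_append]
    by_cases hmem : (c.take 1) ∈ rl.map (fun c => c.take 1)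
    · -- key present: erase, then insert appends the merged contact at the end
      have hksome : (rl.foldl pvStepB PySem.Dict.empty).get? (c.take 1) =
          some (pvReduceGroup (rl.filter (fun c' => c'.take 1 == c.take 1))) := by
        rw [hget, if_pos hmem]
      have herase : ((rl.foldl pvStepB PySem.Dict.empty).erase (c.take 1)).items =
          ((rl.map (fun c => c.take 1)).dedup.filter (fun x => x ≠ c.take 1)).map
            (fun k' => (k', pvReduceGroup (rl.filter (fun c' => c'.take 1 == k')))) := by
        have : ((rl.foldl pvStepB PySem.Dict.empty).erase (c.take 1)).items =
            (rl.foldl pvStepB PySem.Dict.empty).items.filter (fun p => !(p.1 == c.take 1)) := by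
          simp [PySem.Dict.erase]
        rw [this, ih]
        simp only [pvChar, List.filter_map]
        congr 1
        apply List.filter_congr
        intro x hx
        simp [beq_eq_decide]
      have hcon : ((rl.foldl pvStepB PySem.Dict.empty).erase (c.take 1)).contains (c.take 1) = false := by
        simp only [PySem.Dict.contains, herase, List.any_eq_false]
        intro p hp
        obtain ⟨x, hx, rfl⟩ := List.mem_map.mp hp
        have hxk : x ≠ c.take 1 := by
          have := List.of_mem_filter hx
          simpa using this
        simp [hxk]
      have hstep : (pvStepB (rl.foldl pvStepB PySem.Dict.empty) c).items =
          ((rl.foldl pvStepB PySem.Dict.empty).erase (c.take 1)).items ++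
            [(c.take 1, pvMerge (pvReduceGroup (rl.filter (fun c' => c'.take 1 == c.take 1))) c)] := by
        simp only [pvStepB, hksome]
        rw [PySem.Dict.items_insert_of_not_contains _ _ hcon]
      rw [hstep, herase, hmapchar]
      congr 2
      have hne : rl.filter (fun c' => c'.take 1 == c.take 1) ≠ [] := by
        obtain ⟨c', hc', hck⟩ := List.mem_map.mp hmem
        intro hnil
        have : c' ∈ rl.filter (fun c' => c'.take 1 == c.take 1) :=
          List.mem_filter.mpr ⟨hc', by simp [hck]⟩
        simp [hnil] at this
      rw [pvReduceGroup_concat _ _ hne]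
    · -- fresh key: plain insert at the end
      have hknone : (rl.foldl pvStepB PySem.Dict.empty).get? (c.take 1) = none := by
        rw [hget, if_neg hmem]
      have hcon : (rl.foldl pvStepB PySem.Dict.empty).contains (c.take 1) = false := by
        simp only [PySem.Dict.contains, List.any_eq_false]
        intro p hp
        rw [ih] at hp
        simp only [pvChar] at hp
        obtain ⟨k', hk', rfl⟩ := List.mem_map.mp hp
        have hk'mem : k' ∈ rl.map (fun c => c.take 1) := (List.mem_dedup).mp hk'
        intro h
        have hkk : k' = List.take 1 c := by simpa using h
        exact hmem (hkk ▸ hk'mem)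
      have hstep : (pvStepB (rl.foldl pvStepB PySem.Dict.empty) c).items =
          (rl.foldl pvStepB PySem.Dict.empty).items ++ [(c.take 1, c)] := by
        simp [pvStepB, hknone, PySem.Dict.items_insert_of_not_contains _ _ hcon]
      rw [hstep, ih, hmapchar]
      have hfe : (rl.map (fun c => c.take 1)).dedup.filter (fun x => x ≠ c.take 1) =
          (rl.map (fun c => c.take 1)).dedup := by
        apply List.filter_eq_self.mpr
        intro x hx
        have : x ∈ rl.map (fun c => c.take 1) := (List.mem_dedup).mp hx
        simp only [ne_eq, decide_eq_true_eq]
        rintro rfl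
        exact hmem this
      rw [hfe]
      have hnil : rl.filter (fun c' => c'.take 1 == c.take 1) = [] := by
        apply List.filter_eq_nil_iff.mpr
        intro c' hc' h
        have hkk : List.take 1 c' = List.take 1 c := by simpa using h
        exact hmem (hkk ▸ List.mem_map_of_mem hc')
      rw [hnil]
      simp [pvChar, pvReduceGroup]

lemma pvMidValues (rl : List (List String)) :
    (rl.foldl pvStepB PySem.Dict.empty).values =
      ((rl.map (fun c => c.take 1)).dedup).map
        (fun k => pvReduceGroup (rl.filter (fun c => c.take 1 == k))) := by
  show ((rl.foldl pvStepB PySem.Dict.empty).items.map (fun p : List String × List String => p.2)) = _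
  rw [pvMidItems]
  simp [pvChar, List.map_map, Function.comp]

-- ---- B side

lemma pvGroupsGetD (rl : List (List String)) (k : List String) :
    (rl.foldl pvGroupsStep PySem.Dict.empty).getD k [] =
      rl.filter (fun c => c.take 1 == k) := by
  have h1 : rl.foldl pvGroupsStep PySem.Dict.empty =
      (rl.map (fun c => (c.take 1, c))).foldl
        (fun d p => d.modify p.1 [] (fun g => g ++ [p.2])) PySem.Dict.empty := by
    rw [List.foldl_map]
    rfl
  rw [h1, PySem.Dict.getD_foldl_modify_append]
  rw [List.filter_map, List.map_map]
  simp [Function.comp_def, PySem.Dict.getD_empty]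

lemma pvOrderPair : ∀ (l : List (List String)) (s : PySem.Set (List String)),
    l.foldl pvOrderStep (s, s) =
      (l.foldl (fun s c => PySem.Set.add s (c.take 1)) s,
       l.foldl (fun s c => PySem.Set.add s (c.take 1)) s) := by
  intro l
  induction l with
  | nil => intro s; rfl
  | cons c t ih =>
    intro s
    have hstep : pvOrderStep (s, s) c = (PySem.Set.add s (c.take 1), PySem.Set.add s (c.take 1)) := by
      simp only [pvOrderStep, PySem.Set.add]
      split_ifs with h <;> rfl
    simp only [List.foldl_cons, hstep, ih]

lemma pvRevDedup (l : List (List String)) :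
    (PySem.Set.ofList l.reverse).reverse = l.dedup := by
  induction l with
  | nil => simp [PySem.Set.ofList]
  | cons x t ih =>
    rw [List.reverse_cons]
    have hadd : PySem.Set.ofList (t.reverse ++ [x]) =
        PySem.Set.add (PySem.Set.ofList t.reverse) x := by
      simp [PySem.Set.ofList, List.foldl_append]
    rw [hadd]
    by_cases hx : x ∈ t
    · have hmem' : x ∈ PySem.Set.ofList t.reverse :=
        (PySem.Set.mem_ofList _ _).mpr (List.mem_reverse.mpr hx)
      rw [show PySem.Set.add (PySem.Set.ofList t.reverse) x = PySem.Set.ofList t.reverse by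
        simp [PySem.Set.add, hmem']]
      rw [ih, List.dedup_cons_of_mem hx]
    · have hmem' : x ∉ PySem.Set.ofList t.reverse := fun h =>
        hx (List.mem_reverse.mp ((PySem.Set.mem_ofList _ _).mp h))
      rw [show PySem.Set.add (PySem.Set.ofList t.reverse) x = PySem.Set.ofList t.reverse ++ [x] by
        simp [PySem.Set.add, hmem']]
      rw [List.reverse_append, ih, List.dedup_cons_of_notMem hx]
      simp

-- ===== VERDICT (by name: the statement is the Claim_ definition above) =====
theorem final_format_spec : Claim_equal_final_format := by
  intro rl _
  unfold Spec_final_format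
  have hBalt : final_format_alt rl =
      ((rl.reverse.foldl pvOrderStep (PySem.Set.empty, [])).2).reverse.foldl
        (fun fl k => fl ++ [pvReduceGroup ((rl.foldl pvGroupsStep PySem.Dict.empty).getD k [])])
        [] := rfl
  have hA : final_format rl = (rl.foldl pvStepB PySem.Dict.empty).values := by
    have h := pvFold_eq rl PySem.Dict.empty
      ⟨by simp [PySem.Dict.empty, PySem.Dict.keys], by simp [PySem.Dict.empty]⟩
    simpa [final_format, PySem.Dict.empty, PySem.Dict.values] using h
  have horder : (rl.reverse.foldl pvOrderStep (PySem.Set.empty, [])).2 =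
      PySem.Set.ofList (rl.reverse.map (fun c => c.take 1)) := by
    have h0 : (PySem.Set.empty : PySem.Set (List String)) = ([] : List (List String)) := rfl
    rw [h0, pvOrderPair rl.reverse []]
    show rl.reverse.foldl (fun s c => PySem.Set.add s (c.take 1)) [] = _
    rw [show PySem.Set.ofList (rl.reverse.map (fun c => c.take 1)) =
        (rl.reverse.map (fun c => c.take 1)).foldl PySem.Set.add [] from
      PySem.Set.ofList_eq_foldl _]
    rw [List.foldl_map]
  rw [hA, pvMidValues, hBalt, horder, List.map_reverse, pvRevDedup,
    PySem.List.foldl_append_singleton_eq_map]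
  apply List.map_congr_left
  intro k hk
  rw [pvGroupsGetD]
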